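-- pv_equiv track=rewrite | github.com/rosskcoding/ESGvist-Dashboard | backend/scripts/import_gri_sectoral_docx.py | extract_items_from_additional_disclosure
-- ===== SOURCE A (Python) =====
-- def clean_bullet_prefix(text: str) -> tuple[str, bool]:
--     stripped = text.strip()
--     for prefix in ("•", "-", "–"):
--         if stripped.startswith(prefix):
--             return stripped[len(prefix) :].strip(), True
--     return stripped, False
--
-- def extract_items_from_additional_disclosure(paragraphs: list[str]) -> tuple[str, list[str]]:
--     cleaned_paragraphs = [p.strip() for p in paragraphs if p.strip()]
--     if not cleaned_paragraphs:
--         return "", []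
--
--     title = cleaned_paragraphs[0].rstrip(":")
--     tail = cleaned_paragraphs[1:]
--
--     bullet_items: list[str] = []
--     current_item: str | None = None
--     for paragraph in tail:
--         cleaned, is_bullet = clean_bullet_prefix(paragraph)
--         if is_bullet:
--             if current_item is not None:
--                 bullet_items.append(current_item)
--             current_item = cleaned
--         else:
--             if current_item is not None:
--                 current_item = f"{current_item} {cleaned}".strip()
--             else:
--                 title = f"{title} {cleaned}".strip()
--
--     if current_item is not None:
--         bullet_items.append(current_item)
--
--     if bullet_items:
--         return title, [" ".join(item.split()) for item in bullet_items if item.strip()]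
--
--     return title, [" ".join(title.split())]
-- ===== SOURCE B (Python) =====
-- def clean_bullet_prefix(text: str) -> tuple[str, bool]:
--     stripped = text.strip()
--     for prefix in ("•", "-", "–"):
--         if stripped.startswith(prefix):
--             return stripped[len(prefix):].strip(), True
--     return stripped, False
--
--
-- def extract_items_from_additional_disclosure(paragraphs: list[str]) -> tuple[str, list[str]]:
--     cleaned = [p.strip() for p in paragraphs if p.strip()]
--     if not cleaned:
--         return "", []
--
--     entries = [clean_bullet_prefix(p) for p in cleaned[1:]]
--     k = next((i for i, e in enumerate(entries) if e[1]), len(entries))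
--
--     title = cleaned[0].rstrip(":")
--     for text, _ in entries[:k]:
--         title = f"{title} {text}".strip()
--
--     groups: list[list[str]] = []
--     for text, is_bullet in entries[k:]:
--         if is_bullet:
--             groups.append([text])
--         else:
--             groups[-1].append(text)
--
--     if not groups:
--         return title, [" ".join(title.split())]
--
--     items = [" ".join(" ".join(g).split()) for g in groups]
--     return title, [it for it in items if it]
-- ===== Notes on version B (the rewrite author's own statement) =====
-- stated objective: alternative
-- what changed: A's single stateful pass with a mutable current_item/title is replaced by a split-and-group decomposition: clean all tail entries once, locate the first bullet, fold the pre-bullet prefix into the title, partition the remaining entries into bullet-led groups, and join/normalize each group.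
import Mathlib
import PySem

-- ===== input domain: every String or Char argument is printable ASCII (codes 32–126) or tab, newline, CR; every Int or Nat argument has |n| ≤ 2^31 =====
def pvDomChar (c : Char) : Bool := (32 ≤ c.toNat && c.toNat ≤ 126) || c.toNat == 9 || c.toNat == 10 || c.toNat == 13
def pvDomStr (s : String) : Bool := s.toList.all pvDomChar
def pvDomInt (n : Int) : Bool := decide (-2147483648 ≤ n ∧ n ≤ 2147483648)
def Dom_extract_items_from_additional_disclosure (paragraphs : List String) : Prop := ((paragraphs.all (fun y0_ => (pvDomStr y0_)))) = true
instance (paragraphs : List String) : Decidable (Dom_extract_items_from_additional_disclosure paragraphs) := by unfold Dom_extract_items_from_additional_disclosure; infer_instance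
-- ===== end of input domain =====

-- B replaces A's single stateful loop (mutable current_item/title) by a split-and-group
-- decomposition: clean all tail entries once, fold the pre-bullet prefix into the title,
-- partition the rest into bullet-led groups and normalize each group; objective: alternative
-- (same O(n) cost, different decomposition).

-- ===== PORT A =====
-- clean_bullet_prefix(text): strip, test the three bullet prefixes in order
def pvCleanBullet (t : List Char) : List Char × Bool :=
  let s := PySem.Chars.strip t
  if PySem.Chars.startswith s ['•'] then (PySem.Chars.strip (s.drop 1), true)
  else if PySem.Chars.startswith s ['-'] then (PySem.Chars.strip (s.drop 1), true)
  else if PySem.Chars.startswith s ['–'] then (PySem.Chars.strip (s.drop 1), true)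
  else (s, false)
  -- stripped[len(prefix):] with a length-1 prefix is s.drop 1 (index nonnegative, exact)

-- s.rstrip(":"): drop trailing ':' characters (exact port of str.rstrip(":"))
def pvRstripColon (s : List Char) : List Char :=
  (s.reverse.dropWhile (fun c => c == ':')).reverse

-- f"{a} {b}".strip()
def pvJoinSp (a b : List Char) : List Char :=
  PySem.Chars.strip (a ++ ' ' :: b)

-- the loop body of A, on the already-cleaned pair (cleaned, is_bullet)
def pvACore (st : List Char × List (List Char) × Option (List Char))
    (e : List Char × Bool) : List Char × List (List Char) × Option (List Char) :=
  if e.2 then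
    match st.2.2 with
    | some c => (st.1, st.2.1 ++ [c], some e.1)
    | none   => (st.1, st.2.1, some e.1)
  else
    match st.2.2 with
    | some c => (st.1, st.2.1, some (pvJoinSp c e.1))
    | none   => (pvJoinSp st.1 e.1, st.2.1, none)

-- " ".join(s.split())
def pvNormalize (s : List Char) : List Char :=
  PySem.Chars.join [' '] (PySem.Chars.split₀ s)

def extract_items_from_additional_disclosure (paragraphs : List String) : String × List String :=
  let cps := (paragraphs.map (fun p => PySem.Chars.strip p.toList)).filter (fun s => !s.isEmpty)
  match cps with
  | [] => ("", [])
  | h :: tail =>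
    let st := tail.foldl (fun st p => pvACore st (pvCleanBullet p)) (pvRstripColon h, [], none)
    let items := match st.2.2 with
      | some c => st.2.1 ++ [c]
      | none   => st.2.1
    if !items.isEmpty then
      (String.ofList st.1,
        (items.filter (fun i => !(PySem.Chars.strip i).isEmpty)).map
          (fun i => String.ofList (pvNormalize i)))
    else
      (String.ofList st.1, [String.ofList (pvNormalize st.1)])

-- ===== PORT B =====
-- groups[-1].append / groups.append of B's grouping loop
def pvBGroupStep (gs : List (List (List Char))) (e : List Char × Bool) : List (List (List Char)) :=
  if e.2 then gs ++ [[e.1]]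
  else gs.dropLast ++ [((gs.getLast?.getD []) ++ [e.1])]
  -- groups[-1] exists whenever this branch runs (entries[k:] starts with a bullet)

def extract_items_from_additional_disclosure_alt (paragraphs : List String) : String × List String :=
  let cps := (paragraphs.map (fun p => PySem.Chars.strip p.toList)).filter (fun s => !s.isEmpty)
  match cps with
  | [] => ("", [])
  | h :: tail =>
    let entries := tail.map pvCleanBullet
    -- k = index of the first bullet: entries[:k] / entries[k:] are takeWhile / dropWhile
    let pre  := entries.takeWhile (fun e => !e.2)
    let post := entries.dropWhile (fun e => !e.2)
    let title := pre.foldl (fun t e => pvJoinSp t e.1) (pvRstripColon h)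
    let groups := post.foldl pvBGroupStep []
    if groups.isEmpty then
      (String.ofList title, [String.ofList (pvNormalize title)])
    else
      let items := groups.map (fun g => pvNormalize (PySem.Chars.join [' '] g))
      (String.ofList title, (items.filter (fun i => !i.isEmpty)).map String.ofList)

-- ===== PRECONDITION & SPEC =====
def Spec_extract_items_from_additional_disclosure (paragraphs : List String) (out : String × List String) : Prop := out = extract_items_from_additional_disclosure_alt paragraphs
instance (paragraphs : List String) (out : String × List String) : Decidable (Spec_extract_items_from_additional_disclosure paragraphs out) := by unfold Spec_extract_items_from_additional_disclosure; infer_instance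

-- ===== CLAIM (what is proved, stated in full; the proofs are below) =====
def Claim_equal_extract_items_from_additional_disclosure : Prop := ∀ (paragraphs : List String), Dom_extract_items_from_additional_disclosure paragraphs → Spec_extract_items_from_additional_disclosure paragraphs (extract_items_from_additional_disclosure paragraphs)

-- ===== LEMMAS AND PROOFS =====

-- ---- facts about PySem.Chars.split₀.go ----

theorem pv_go_acc (s : List Char) (cur : List Char) (acc : List (List Char)) :
    PySem.Chars.split₀.go s cur acc = acc.reverse ++ PySem.Chars.split₀.go s cur [] := by
  induction s generalizing cur acc with
  | nil =>
    by_cases h : cur.isEmpty <;> simp [PySem.Chars.split₀.go, h]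
  | cons c r ih =>
    simp only [PySem.Chars.split₀.go]
    by_cases hs : PySem.Chars.isspace c
    · by_cases hc : cur.isEmpty <;> simp only [hs, hc, if_true, if_false, ite_true, ite_false]
      · exact ih [] acc
      · rw [ih [] (cur.reverse :: acc), ih [] [cur.reverse]]; simp
    · simp only [hs, if_false, ite_false]; exact ih (c :: cur) acc

theorem pv_go_space {c : Char} (hc : PySem.Chars.isspace c = true) (a : List Char)
    (cur : List Char) (acc : List (List Char)) (b : List Char) :
    PySem.Chars.split₀.go (a ++ c :: b) cur acc
      = PySem.Chars.split₀.go b [] ((PySem.Chars.split₀.go a cur acc).reverse) := by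
  induction a generalizing cur acc with
  | nil =>
    by_cases h : cur.isEmpty <;>
      simp [PySem.Chars.split₀.go, hc, h]
  | cons d a' ih =>
    simp only [List.cons_append, PySem.Chars.split₀.go]
    by_cases hd : PySem.Chars.isspace d
    · by_cases hcur : cur.isEmpty <;> simp only [hd, hcur, if_true, if_false, ite_true, ite_false] <;> exact ih ..
    · simp only [hd, if_false, ite_false]; exact ih ..

theorem pv_split₀_append_space {c : Char} (hc : PySem.Chars.isspace c = true)
    (a b : List Char) :
    PySem.Chars.split₀ (a ++ c :: b) = PySem.Chars.split₀ a ++ PySem.Chars.split₀ b := by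
  unfold PySem.Chars.split₀
  rw [pv_go_space hc, pv_go_acc]
  simp

theorem pv_go_lstrip (s : List Char) (acc : List (List Char)) :
    PySem.Chars.split₀.go (s.dropWhile PySem.Chars.isspace) [] acc
      = PySem.Chars.split₀.go s [] acc := by
  induction s with
  | nil => rfl
  | cons c r ih =>
    by_cases hc : PySem.Chars.isspace c
    · simp only [List.dropWhile_cons, hc, if_true, ite_true]
      rw [ih]
      simp [PySem.Chars.split₀.go, hc]
    · simp [List.dropWhile_cons, hc]

theorem pv_go_allspace (w : List Char) (h : ∀ x ∈ w, PySem.Chars.isspace x = true)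
    (cur : List Char) (acc : List (List Char)) :
    PySem.Chars.split₀.go w cur acc = PySem.Chars.split₀.go [] cur acc := by
  induction w generalizing cur acc with
  | nil => rfl
  | cons c r ih =>
    have hc : PySem.Chars.isspace c = true := h c (by simp)
    have hr : ∀ x ∈ r, PySem.Chars.isspace x = true := fun x hx => h x (by simp [hx])
    by_cases hcur : cur.isEmpty = true
    · have hcur' : cur = [] := by simpa using hcur
      subst hcur'
      simp only [PySem.Chars.split₀.go, hc, if_true, ite_true, List.isEmpty_nil]
      exact ih hr [] acc
    · simp only [PySem.Chars.split₀.go, hc, if_true, ite_true]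
      rw [if_neg hcur, ih hr]
      simp [PySem.Chars.split₀.go, hcur]

theorem pv_go_trailing (w : List Char) (h : ∀ x ∈ w, PySem.Chars.isspace x = true)
    (u : List Char) (cur : List Char) (acc : List (List Char)) :
    PySem.Chars.split₀.go (u ++ w) cur acc = PySem.Chars.split₀.go u cur acc := by
  induction u generalizing cur acc with
  | nil => simpa using pv_go_allspace w h cur acc
  | cons c r ih =>
    simp only [List.cons_append, PySem.Chars.split₀.go]
    by_cases hc : PySem.Chars.isspace c
    · by_cases hcur : cur.isEmpty <;> simp only [hc, hcur, if_true, if_false, ite_true, ite_false] <;> exact ih ..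
    · simp only [hc, if_false, ite_false]; exact ih ..

theorem pv_split₀_rstrip (s : List Char) :
    PySem.Chars.split₀ (PySem.Chars.rstrip s) = PySem.Chars.split₀ s := by
  have hdecomp : s = PySem.Chars.rstrip s ++ (s.reverse.takeWhile PySem.Chars.isspace).reverse := by
    unfold PySem.Chars.rstrip
    conv_lhs => rw [← s.reverse_reverse]
    conv_lhs => rw [← List.takeWhile_append_dropWhile (p := PySem.Chars.isspace) (l := s.reverse)]
    rw [List.reverse_append]
  conv_rhs => rw [hdecomp]
  unfold PySem.Chars.split₀
  rw [pv_go_trailing]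
  intro x hx
  exact List.mem_takeWhile_imp (by simpa using hx)

theorem pv_split₀_strip (s : List Char) :
    PySem.Chars.split₀ (PySem.Chars.strip s) = PySem.Chars.split₀ s := by
  unfold PySem.Chars.strip
  rw [pv_split₀_rstrip]
  unfold PySem.Chars.lstrip PySem.Chars.split₀
  exact pv_go_lstrip s []

theorem pv_isspace_space : PySem.Chars.isspace ' ' = true := by decide

theorem pv_split₀_joinSp (a b : List Char) :
    PySem.Chars.split₀ (pvJoinSp a b) = PySem.Chars.split₀ a ++ PySem.Chars.split₀ b := by
  unfold pvJoinSp
  rw [pv_split₀_strip, pv_split₀_append_space pv_isspace_space]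

theorem pv_go_forall_ne_nil (s : List Char) (cur : List Char) (acc : List (List Char))
    (hacc : ∀ x ∈ acc, x ≠ []) :
    ∀ w ∈ PySem.Chars.split₀.go s cur acc, w ≠ [] := by
  induction s generalizing cur acc with
  | nil =>
    intro w hw
    simp only [PySem.Chars.split₀.go] at hw
    by_cases hcur : cur.isEmpty = true
    · rw [if_pos hcur] at hw
      exact hacc w (by simpa using hw)
    · rw [if_neg hcur] at hw
      rw [List.mem_reverse] at hw
      rcases List.mem_cons.1 hw with hw | hw
      · subst hw
        intro hcon
        apply hcur
        rw [List.isEmpty_iff]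
        simpa using hcon
      · exact hacc w hw
  | cons ch r ih =>
    intro w hw
    simp only [PySem.Chars.split₀.go] at hw
    by_cases hc : PySem.Chars.isspace ch = true
    · rw [if_pos hc] at hw
      by_cases hcur : cur.isEmpty = true
      · rw [if_pos hcur] at hw
        exact ih [] acc hacc w hw
      · rw [if_neg hcur] at hw
        refine ih [] (cur.reverse :: acc) ?_ w hw
        intro x hx
        rcases List.mem_cons.1 hx with hx | hx
        · subst hx
          intro hcon
          apply hcur
          rw [List.isEmpty_iff]
          simpa using hcon
        · exact hacc x hx
    · rw [if_neg hc] at hw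
      exact ih (ch :: cur) acc hacc w hw

theorem pv_mem_split₀_ne_nil {s : List Char} {w : List Char}
    (hw : w ∈ PySem.Chars.split₀ s) : w ≠ [] :=
  pv_go_forall_ne_nil s [] [] (by simp) w hw

theorem pv_go_ne_nil (s : List Char) (cur : List Char) (acc : List (List Char))
    (h : s.all PySem.Chars.isspace = false ∨ cur ≠ [] ∨ acc ≠ []) :
    PySem.Chars.split₀.go s cur acc ≠ [] := by
  induction s generalizing cur acc with
  | nil =>
    rcases h with h | h | h
    · simp at h
    · have : cur.isEmpty = false := by simpa [List.isEmpty_iff] using h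
      simp [PySem.Chars.split₀.go, this]
    · by_cases hcur : cur.isEmpty <;> simp [PySem.Chars.split₀.go, hcur, h]
  | cons c r ih =>
    simp only [PySem.Chars.split₀.go]
    by_cases hc : PySem.Chars.isspace c
    · have hr : r.all PySem.Chars.isspace = false ∨ cur ≠ [] ∨ acc ≠ [] := by
        rcases h with h | h | h
        · left; simpa [hc] using h
        · right; left; exact h
        · right; right; exact h
      by_cases hcur : cur.isEmpty <;> simp only [hc, hcur, if_true, if_false, ite_true, ite_false]
      · apply ih
        rcases hr with hr | hr | hr
        · exact Or.inl hr
        · exact absurd (List.isEmpty_iff.1 hcur) hr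
        · exact Or.inr (Or.inr hr)
      · exact ih [] (cur.reverse :: acc) (Or.inr (Or.inr (by simp)))
    · simp only [hc, if_false, ite_false]
      exact ih (c :: cur) acc (Or.inr (Or.inl (by simp)))

theorem pv_split₀_eq_nil_iff (s : List Char) :
    PySem.Chars.split₀ s = [] ↔ s.all PySem.Chars.isspace = true := by
  constructor
  · intro h
    by_contra hall
    exact pv_go_ne_nil s [] [] (Or.inl (by simpa using hall)) h
  · intro h
    unfold PySem.Chars.split₀
    rw [pv_go_allspace s (by simpa [List.all_eq_true] using h)]
    rfl

theorem pv_strip_eq_nil_iff (s : List Char) :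
    PySem.Chars.strip s = [] ↔ s.all PySem.Chars.isspace = true := by
  unfold PySem.Chars.strip PySem.Chars.rstrip PySem.Chars.lstrip
  simp only [List.reverse_eq_nil_iff, List.dropWhile_eq_nil_iff, List.mem_reverse, List.all_eq_true]
  constructor
  · intro h x hx
    by_cases hd : s.dropWhile PySem.Chars.isspace = []
    · exact List.dropWhile_eq_nil_iff.1 hd x hx
    · exfalso
      have hhead := List.head_dropWhile_not PySem.Chars.isspace hd
      have hmem : (s.dropWhile PySem.Chars.isspace).head hd ∈ s.dropWhile PySem.Chars.isspace :=
        List.head_mem hd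
      have := h _ hmem
      simp [this] at hhead
  · intro h x hx
    exact h x ((List.dropWhile_sublist _).subset hx)

theorem pv_join_eq_nil_iff (W : List (List Char)) (hW : ∀ w ∈ W, w ≠ []) :
    (PySem.Chars.join [' '] W = [] ↔ W = []) := by
  cases W with
  | nil => simp [PySem.Chars.join_nil]
  | cons w ws =>
    cases ws with
    | nil =>
      simp only [PySem.Chars.join_singleton]
      simpa using hW w (by simp)
    | cons w' ws' =>
      rw [PySem.Chars.join_cons_cons]
      constructor
      · intro h
        exact absurd h (by simp [hW w (by simp)])
      · intro h; cases h

theorem pv_split₀_join (parts : List (List Char)) :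
    PySem.Chars.split₀ (PySem.Chars.join [' '] parts) = (parts.map PySem.Chars.split₀).flatten := by
  induction parts with
  | nil => simp [PySem.Chars.join_nil, PySem.Chars.split₀, PySem.Chars.split₀.go]
  | cons w ws ih =>
    cases ws with
    | nil => simp [PySem.Chars.join_singleton]
    | cons w' ws' =>
      rw [PySem.Chars.join_cons_cons]
      have hrw : w ++ [' '] ++ PySem.Chars.join [' '] (w' :: ws') = w ++ ' ' :: PySem.Chars.join [' '] (w' :: ws') := by simp
      rw [hrw, pv_split₀_append_space pv_isspace_space, ih]
      simp

-- ---- loop-shape lemmas for the two ports ----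

-- A's loop while current_item is None and no bullet arrives: only the title grows
theorem pv_A_phase1 (pre : List (List Char × Bool)) (h : ∀ e ∈ pre, e.2 = false)
    (rest : List (List Char × Bool)) (t : List Char) (its : List (List Char)) :
    (pre ++ rest).foldl pvACore (t, its, none)
      = rest.foldl pvACore (pre.foldl (fun t e => pvJoinSp t e.1) t, its, none) := by
  induction pre generalizing t with
  | nil => rfl
  | cons e pre' ih =>
    have he : e.2 = false := h e (by simp)
    simp only [List.cons_append, List.foldl_cons, pvACore, he]
    simp only [Bool.false_eq_true, if_false, ite_false]
    exact ih (fun x hx => h x (by simp [hx])) _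

-- the items A's loop emits once a current_item exists, as a recursive function
def pvPhase2 (c : List Char) : List (List Char × Bool) → List (List Char)
  | [] => [c]
  | (t, true) :: r => c :: pvPhase2 t r
  | (t, false) :: r => pvPhase2 (pvJoinSp c t) r

theorem pv_A_phase2 (l : List (List Char × Bool)) (t : List Char)
    (its : List (List Char)) (c : List Char) :
    ∃ front lastv, pvPhase2 c l = front ++ [lastv] ∧
      l.foldl pvACore (t, its, some c) = (t, its ++ front, some lastv) := by
  induction l generalizing c its with
  | nil => exact ⟨[], c, rfl, by simp⟩
  | cons e r ih =>
    rcases e with ⟨txt, b⟩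
    cases b
    · rcases ih its (pvJoinSp c txt) with ⟨front, lastv, h1, h2⟩
      exact ⟨front, lastv, by simpa [pvPhase2] using h1, by simpa [pvACore] using h2⟩
    · rcases ih (its ++ [c]) txt with ⟨front, lastv, h1, h2⟩
      refine ⟨c :: front, lastv, by simp [pvPhase2, h1], ?_⟩
      simp only [List.foldl_cons, pvACore]
      simpa using h2

-- B's grouping loop, as a recursive function on segments
def pvSegs (g : List (List Char)) : List (List Char × Bool) → List (List (List Char))
  | [] => [g]
  | (t, true) :: r => g :: pvSegs [t] r
  | (t, false) :: r => pvSegs (g ++ [t]) r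

theorem pv_B_groups (l : List (List Char × Bool)) (acc : List (List (List Char)))
    (g : List (List Char)) :
    l.foldl pvBGroupStep (acc ++ [g]) = acc ++ pvSegs g l := by
  induction l generalizing acc g with
  | nil => rfl
  | cons e r ih =>
    rcases e with ⟨txt, b⟩
    cases b
    · have hstep : pvBGroupStep (acc ++ [g]) (txt, false) = acc ++ [g ++ [txt]] := by
        simp [pvBGroupStep]
      simp only [List.foldl_cons, hstep, pvSegs]
      exact ih acc (g ++ [txt])
    · have hstep : pvBGroupStep (acc ++ [g]) (txt, true) = (acc ++ [g]) ++ [[txt]] := by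
        simp [pvBGroupStep]
      simp only [List.foldl_cons, hstep, pvSegs]
      rw [ih (acc ++ [g]) [txt]]
      simp

theorem pv_segs_ne_nil (l : List (List Char × Bool)) (g : List (List Char)) :
    pvSegs g l ≠ [] := by
  induction l generalizing g with
  | nil => simp [pvSegs]
  | cons e r ih =>
    rcases e with ⟨txt, b⟩
    cases b <;> simp [pvSegs, ih]

-- the word lists of A's accumulated items and of B's segments coincide
theorem pv_phase2_segs (l : List (List Char × Bool)) (c : List Char)
    (g : List (List Char))
    (hcg : PySem.Chars.split₀ c = (g.map PySem.Chars.split₀).flatten) :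
    (pvPhase2 c l).map PySem.Chars.split₀
      = (pvSegs g l).map (fun gr => (gr.map PySem.Chars.split₀).flatten) := by
  induction l generalizing c g with
  | nil => simp [pvPhase2, pvSegs, hcg]
  | cons e r ih =>
    rcases e with ⟨txt, b⟩
    cases b
    · simp only [pvPhase2, pvSegs]
      apply ih
      rw [pv_split₀_joinSp, hcg]
      simp
    · simp only [pvPhase2, pvSegs, List.map_cons]
      rw [hcg, ih txt [txt] (by simp)]

-- the filtered, normalized item lists of both ports coincide, given equal word lists
set_option maxRecDepth 8192 in
theorem pv_items_eq (P : List (List Char)) (S : List (List (List Char)))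
    (h : P.map PySem.Chars.split₀ = S.map (fun gr => (gr.map PySem.Chars.split₀).flatten)) :
    (P.filter (fun i => !(PySem.Chars.strip i).isEmpty)).map (fun i => String.ofList (pvNormalize i))
      = ((S.map (fun g => pvNormalize (PySem.Chars.join [' '] g))).filter
          (fun i => !i.isEmpty)).map String.ofList := by
  induction P generalizing S with
  | nil =>
    cases S with
    | nil => rfl
    | cons g S' => simp at h
  | cons p P' ih =>
    cases S with
    | nil => simp at h
    | cons g S' =>
      simp only [List.map_cons, List.cons.injEq] at h
      rcases h with ⟨hw, hrest⟩
      have hnormg : pvNormalize (PySem.Chars.join [' '] g) = pvNormalize p := by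
        unfold pvNormalize
        rw [pv_split₀_join, ← hw]
      by_cases hp : (PySem.Chars.strip p).isEmpty
      · have hps : PySem.Chars.strip p = [] := List.isEmpty_iff.1 hp
        have hsp : PySem.Chars.split₀ p = [] := by
          rw [pv_split₀_eq_nil_iff]
          exact (pv_strip_eq_nil_iff p).1 hps
        have hnorm : pvNormalize p = [] := by
          unfold pvNormalize
          rw [hsp]; rfl
        simp only [List.filter_cons, hp, hnormg, hnorm, List.map_cons, List.isEmpty_nil,
          Bool.not_true, Bool.false_eq_true, reduceIte]
        exact ih S' hrest
      · have hps : PySem.Chars.strip p ≠ [] := fun hcon => hp (by rw [hcon]; rfl)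
        have hsp : PySem.Chars.split₀ p ≠ [] := by
          intro hcon
          exact hps ((pv_strip_eq_nil_iff p).2 ((pv_split₀_eq_nil_iff p).1 hcon))
        have hnorm : pvNormalize p ≠ [] := by
          unfold pvNormalize
          intro hcon
          exact hsp (((pv_join_eq_nil_iff (PySem.Chars.split₀ p))
            (fun w hwmem => pv_mem_split₀_ne_nil hwmem)).1 hcon)
        have hp' : (PySem.Chars.strip p).isEmpty = false := by
          simpa [List.isEmpty_iff] using hps
        have hnorm' : (pvNormalize p).isEmpty = false := by
          simpa [List.isEmpty_iff] using hnorm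
        simp only [List.filter_cons, hp', hnormg, hnorm', List.map_cons, Bool.not_false,
          reduceIte]
        rw [ih S' hrest]

-- head of dropWhile fails the predicate
theorem pv_dropWhile_head_bullet (entries : List (List Char × Bool))
    (e : List Char × Bool) (rest : List (List Char × Bool))
    (h : entries.dropWhile (fun e => !e.2) = e :: rest) : e.2 = true := by
  induction entries generalizing rest with
  | nil => simp at h
  | cons x xs ih =>
    rw [List.dropWhile_cons] at h
    by_cases hx : (!x.2) = true
    · rw [if_pos hx] at h
      exact ih rest h
    · rw [if_neg hx] at h
      injection h with h1 _
      subst h1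
      simpa using hx

-- ===== VERDICT (by name: the statement is the Claim_ definition above) =====
theorem extract_items_from_additional_disclosure_spec : Claim_equal_extract_items_from_additional_disclosure := by
  intro paragraphs _
  unfold Spec_extract_items_from_additional_disclosure
  unfold extract_items_from_additional_disclosure extract_items_from_additional_disclosure_alt
  cases hcps : (paragraphs.map (fun p => PySem.Chars.strip p.toList)).filter (fun s => !s.isEmpty) with
  | nil => rfl
  | cons h tail =>
    have hA : tail.foldl (fun st p => pvACore st (pvCleanBullet p))
          (pvRstripColon h, ([] : List (List Char)), (none : Option (List Char)))
        = ((tail.map pvCleanBullet).dropWhile (fun e => !e.2)).foldl pvACore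
            (((tail.map pvCleanBullet).takeWhile (fun e => !e.2)).foldl
              (fun t e => pvJoinSp t e.1) (pvRstripColon h), [], none) := by
      rw [← List.foldl_map (f := pvCleanBullet) (g := pvACore)]
      conv_lhs =>
        rw [show tail.map pvCleanBullet
            = (tail.map pvCleanBullet).takeWhile (fun e => !e.2)
              ++ (tail.map pvCleanBullet).dropWhile (fun e => !e.2)
          from (List.takeWhile_append_dropWhile).symm]
      exact pv_A_phase1 _ (fun e he => by simpa using List.mem_takeWhile_imp he) _ _ _
    simp only []
    rw [hA]
    cases hpost : (tail.map pvCleanBullet).dropWhile (fun e => !e.2) with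
    | nil => rfl
    | cons e rest =>
      have he2 : e.2 = true := pv_dropWhile_head_bullet _ _ _ hpost
      rcases e with ⟨c, b⟩
      simp only at he2
      subst he2
      have hstep1 : pvACore
          (((tail.map pvCleanBullet).takeWhile (fun e => !e.2)).foldl
            (fun t e => pvJoinSp t e.1) (pvRstripColon h), ([] : List (List Char)),
            (none : Option (List Char))) (c, true)
          = (((tail.map pvCleanBullet).takeWhile (fun e => !e.2)).foldl
            (fun t e => pvJoinSp t e.1) (pvRstripColon h), [], some c) := rfl
      rw [List.foldl_cons, hstep1]
      rcases pv_A_phase2 rest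
        (((tail.map pvCleanBullet).takeWhile (fun e => !e.2)).foldl
          (fun t e => pvJoinSp t e.1) (pvRstripColon h)) [] c with ⟨front, lastv, h1, h2⟩
      rw [h2]
      have hB : rest.foldl pvBGroupStep [[c]] = pvSegs [c] rest := pv_B_groups rest [] [c]
      rw [List.foldl_cons, show pvBGroupStep [] (c, true) = [[c]] from rfl, hB]
      have hA_ne : (front ++ [lastv]).isEmpty = false := by
        rw [List.isEmpty_eq_false_iff]
        simp
      have hsegs_ne : (pvSegs [c] rest).isEmpty = false := by
        rw [List.isEmpty_eq_false_iff]
        exact pv_segs_ne_nil rest [c]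
      have hwords := pv_phase2_segs rest c [c] (by simp)
      rw [h1] at hwords
      have hitems := pv_items_eq (front ++ [lastv]) (pvSegs [c] rest) hwords
      simp only [List.nil_append, hA_ne, hsegs_ne, Bool.not_false, Bool.false_eq_true,
        reduceIte]
      rw [← hitems]
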